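-- pv_equiv track=rewrite | github.com/ahanapradhan/UnionExtraction | mysite/unmasque/src/util/aoa_utils.py | optimize_by_matrix
-- ===== SOURCE A (Python) =====
-- def optimize_by_matrix(C_E, aoa_predicates, h, w):
--     m = [[0 for x in range(w)] for y in range(h)]
--     for pred in aoa_predicates:
--         src_idx = C_E.index(pred[0])
--         snk_idx = C_E.index(pred[1])
--         m[src_idx][snk_idx] = 1
--     to_remove = []
--     for x in range(h):
--         for y in range(h):
--             if x != y:
--                 for c in range(w):
--                     if m[x][c] and m[y][c] and m[x][y]:
--                         to_remove.append((x, c))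
--     for r in to_remove:
--         x, c = r[0], r[1]
--         m[x][c] = 0
--     return m
-- ===== SOURCE B (Python) =====
-- def optimize_by_matrix(C_E, aoa_predicates, h, w):
--     succ = {x: set() for x in range(h)}
--     for s, t in aoa_predicates:
--         succ[C_E.index(s)].add(C_E.index(t))
--     result = []
--     for x in range(h):
--         sx = succ[x]
--         implied = set()
--         for y in sx:
--             if y != x and y < h:
--                 for c in succ[y]:
--                     implied.add(c)
--         result.append([1 if (c in sx and c not in implied) else 0 for c in range(w)])
--     return result
-- ===== Notes on version B (the rewrite author's own statement) =====
-- stated objective: alternative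
-- what changed: Replaces A's dense h-by-w matrix with a dict of successor sets per vertex: for each row x it builds an 'implied' set as the union of successor sets of x's own (valid) successors and renders the row by set membership, instead of A's triple index loop over all (x,y,c) with a deferred to_remove list and a clearing pass.
import Mathlib
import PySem

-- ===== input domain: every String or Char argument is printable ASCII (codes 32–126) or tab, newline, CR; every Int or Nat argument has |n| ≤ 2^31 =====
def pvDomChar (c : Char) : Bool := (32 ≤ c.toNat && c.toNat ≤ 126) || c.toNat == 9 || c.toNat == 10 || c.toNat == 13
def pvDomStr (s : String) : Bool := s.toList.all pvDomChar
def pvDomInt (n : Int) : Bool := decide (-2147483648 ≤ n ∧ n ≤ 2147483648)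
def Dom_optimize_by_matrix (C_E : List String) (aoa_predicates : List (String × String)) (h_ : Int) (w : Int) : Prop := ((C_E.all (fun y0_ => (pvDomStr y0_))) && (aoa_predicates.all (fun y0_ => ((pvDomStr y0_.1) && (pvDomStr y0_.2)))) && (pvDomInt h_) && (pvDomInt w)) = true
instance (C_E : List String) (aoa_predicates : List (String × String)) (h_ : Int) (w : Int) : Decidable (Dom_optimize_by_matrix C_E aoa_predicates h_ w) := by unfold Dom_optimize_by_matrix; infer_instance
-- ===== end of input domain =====

-- B replaces A's dense matrix + triple index loop + to_remove list by a dict of successor sets: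
-- per row x it unions the successor sets of x's valid successors into an 'implied' set and
-- renders the row by set membership (objective: alternative decomposition, same return value on Pre_).

-- ===== PORT A =====
def optimize_by_matrix (C_E : List String) (aoa_predicates : List (String × String)) (h_ : Int) (w : Int) : List (List Int) :=
  let m0 : List (List Int) :=
    (PySem.List.pyRange 0 h_ 1).map (fun _ => (PySem.List.pyRange 0 w 1).map (fun _ => (0 : Int)))
  let m1 : List (List Int) := aoa_predicates.foldl (fun m pred =>
    match PySem.List.index? C_E pred.1, PySem.List.index? C_E pred.2 with
    | some src_idx, some snk_idx =>
        PySem.List.pySetD m (src_idx : Int)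
          (PySem.List.pySetD (PySem.List.pyGetD m (src_idx : Int) []) (snk_idx : Int) (1 : Int))
    | _, _ => m) m0   -- C_E.index raises ValueError when missing: Pre_ excludes that, the port keeps m
  let to_remove : List (Int × Int) := (PySem.List.pyRange 0 h_ 1).foldl (fun acc x =>
    (PySem.List.pyRange 0 h_ 1).foldl (fun acc y =>
      if x ≠ y then
        (PySem.List.pyRange 0 w 1).foldl (fun acc c =>
          if PySem.List.pyGetD (PySem.List.pyGetD m1 x []) c 0 ≠ 0 ∧
             PySem.List.pyGetD (PySem.List.pyGetD m1 y []) c 0 ≠ 0 ∧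
             PySem.List.pyGetD (PySem.List.pyGetD m1 x []) y 0 ≠ 0
          then acc ++ [(x, c)] else acc) acc
      else acc) acc) []
  to_remove.foldl (fun m r =>
    PySem.List.pySetD m r.1 (PySem.List.pySetD (PySem.List.pyGetD m r.1 []) r.2 (0 : Int))) m1

-- ===== PORT B =====
def optimize_by_matrix_alt (C_E : List String) (aoa_predicates : List (String × String)) (h_ : Int) (w : Int) : List (List Int) :=
  let succ0 : PySem.Dict Int (PySem.Set Int) :=
    (PySem.List.pyRange 0 h_ 1).foldl (fun d x => d.insert x PySem.Set.empty) PySem.Dict.empty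
  let succ : PySem.Dict Int (PySem.Set Int) := aoa_predicates.foldl (fun d p =>
    match PySem.List.index? C_E p.1 with
    | none => d            -- Python's C_E.index raises ValueError here: excluded by Pre_
    | some s =>
      match PySem.List.index? C_E p.2 with
      | none => d          -- ValueError: excluded by Pre_
      | some t =>
        match d.get? (s : Int) with
        | none => d        -- Python raises KeyError here: excluded by Pre_
        | some S => d.insert (s : Int) (PySem.Set.add S (t : Int))
    ) succ0
  (PySem.List.pyRange 0 h_ 1).map (fun x =>
    let sx : PySem.Set Int := (succ.get? x).getD PySem.Set.empty
    let implied : PySem.Set Int := sx.foldl (fun acc y =>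
      if y ≠ x ∧ y < h_ then
        ((succ.get? y).getD PySem.Set.empty).foldl (fun a c => PySem.Set.add a c) acc
      else acc) PySem.Set.empty
    (PySem.List.pyRange 0 w 1).map (fun c =>
      if c ∈ sx ∧ c ∉ implied then (1 : Int) else 0))

-- ===== PRECONDITION & SPEC =====
-- Pre_ excludes exactly the inputs on which Python A raises: a predicate endpoint missing from C_E
-- or its index outside the h×w matrix (ValueError/IndexError while building m), and the inputs
-- where two edges with distinct sources share a sink while a source index is ≥ w (the scan then
-- evaluates m[x][y] with y ≥ w: IndexError).
def Pre_optimize_by_matrix (C_E : List String) (aoa_predicates : List (String × String)) (h_ : Int) (w : Int) : Prop :=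
  (∀ p ∈ aoa_predicates, p.1 ∈ C_E ∧ p.2 ∈ C_E ∧
      (((PySem.List.index? C_E p.1).getD 0 : Int) < h_) ∧
      (((PySem.List.index? C_E p.2).getD 0 : Int) < w)) ∧
  (∀ p ∈ aoa_predicates, ∀ q ∈ aoa_predicates,
      ((PySem.List.index? C_E p.1).getD 0 ≠ (PySem.List.index? C_E q.1).getD 0 ∧
       (PySem.List.index? C_E p.2).getD 0 = (PySem.List.index? C_E q.2).getD 0) →
      (((PySem.List.index? C_E q.1).getD 0 : Int) < w))
instance (C_E : List String) (aoa_predicates : List (String × String)) (h_ : Int) (w : Int) : Decidable (Pre_optimize_by_matrix C_E aoa_predicates h_ w) := by unfold Pre_optimize_by_matrix; infer_instance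

def pvWitness_optimize_by_matrix : List String × (List (String × String)) × Int × Int :=
  (["a", "b", "c"], [("a", "b"), ("a", "c"), ("b", "c")], 3, 3)

def Spec_optimize_by_matrix (C_E : List String) (aoa_predicates : List (String × String)) (h_ : Int) (w : Int) (out : List (List Int)) : Prop := out = optimize_by_matrix_alt C_E aoa_predicates h_ w
instance (C_E : List String) (aoa_predicates : List (String × String)) (h_ : Int) (w : Int) (out : List (List Int)) : Decidable (Spec_optimize_by_matrix C_E aoa_predicates h_ w out) := by unfold Spec_optimize_by_matrix; infer_instance

-- ===== CLAIM (what is proved, stated in full; the proofs are below) =====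
def Claim_equal_optimize_by_matrix : Prop := ∀ (C_E : List String) (aoa_predicates : List (String × String)) (h_ : Int) (w : Int), Dom_optimize_by_matrix C_E aoa_predicates h_ w → Pre_optimize_by_matrix C_E aoa_predicates h_ w → Spec_optimize_by_matrix C_E aoa_predicates h_ w (optimize_by_matrix C_E aoa_predicates h_ w)

-- ===== LEMMAS AND PROOFS =====

theorem range_cast (b : Int) :
    PySem.List.pyRange 0 b 1 = (List.range b.toNat).map (fun (k : Nat) => (k : Int)) := by
  rw [PySem.List.pyRange_one]
  simp

theorem foldl_ite_append {α β : Type} (l : List α) (Q : α → Prop) [DecidablePred Q]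
    (f : α → β) (acc : List β) :
    l.foldl (fun a x => if Q x then a ++ [f x] else a) acc
      = acc ++ (l.filter (fun x => decide (Q x))).map f := by
  induction l generalizing acc with
  | nil => simp
  | cons h t ih =>
    simp only [List.foldl_cons, List.filter_cons]
    split_ifs with hq <;> simp_all

theorem foldl_ite_flat {α β : Type} (l : List α) (Q : α → Prop) [DecidablePred Q]
    (g : α → List β) (acc : List β) :
    l.foldl (fun a x => if Q x then a ++ g x else a) acc
      = acc ++ l.flatMap (fun x => if Q x then g x else []) := by
  induction l generalizing acc with
  | nil => simp
  | cons h t ih =>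
    simp only [List.foldl_cons, List.flatMap_cons]
    split_ifs with hq <;> simp_all

def mat (H W : Nat) (f : Nat → Nat → Bool) : List (List Int) :=
  (List.range H).map (fun x => (List.range W).map (fun c => if f x c then (1 : Int) else 0))

theorem mat_congr (H W : Nat) (f g : Nat → Nat → Bool)
    (h : ∀ x < H, ∀ c < W, f x c = g x c) : mat H W f = mat H W g := by
  unfold mat
  apply List.map_congr_left
  intro x hx
  apply List.map_congr_left
  intro c hc
  rw [h x (List.mem_range.mp hx) c (List.mem_range.mp hc)]

theorem getD_mat (H W : Nat) (f : Nat → Nat → Bool) (x : Nat) (hx : x < H) :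
    PySem.List.pyGetD (mat H W f) (x : Int) [] =
      (List.range W).map (fun c => if f x c then (1 : Int) else 0) := by
  rw [PySem.List.pyGetD_natCast]
  unfold mat
  rw [List.getD_eq_getElem?_getD]
  simp [hx]

theorem rowval (H W : Nat) (f : Nat → Nat → Bool) (x c : Nat) (hx : x < H) :
    PySem.List.pyGetD (PySem.List.pyGetD (mat H W f) (x : Int) []) (c : Int) 0 =
      if c < W ∧ f x c = true then 1 else 0 := by
  rw [getD_mat H W f x hx, PySem.List.pyGetD_natCast, List.getD_eq_getElem?_getD]
  by_cases hc : c < W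
  · simp [hc]
  · rw [List.getElem?_eq_none (by simpa using hc)]
    simp [hc]

theorem set_map_range {β : Type} (H i : Nat) (_hi : i < H) (g : Nat → β) (v : β) :
    ((List.range H).map g).set i v = (List.range H).map (fun x => if x = i then v else g x) := by
  apply List.ext_getElem
  · simp
  · intro k h1 h2
    simp only [List.getElem_set, List.getElem_map, List.getElem_range]
    by_cases hk : k = i
    · simp [hk]
    · simp [hk]
      intro h; exact absurd h.symm hk

theorem setcell (H W i j : Nat) (hi : i < H) (hj : j < W) (f : Nat → Nat → Bool) (v : Bool) :
    PySem.List.pySetD (mat H W f) (i : Int)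
      (PySem.List.pySetD (PySem.List.pyGetD (mat H W f) (i : Int) []) (j : Int)
        (if v then (1 : Int) else 0)) =
    mat H W (fun x c => if x = i ∧ c = j then v else f x c) := by
  rw [getD_mat H W f i hi]
  rw [PySem.List.pySetD_natCast, PySem.List.pySetD_natCast]
  rw [set_map_range W j hj]
  unfold mat
  rw [set_map_range H i hi]
  apply List.map_congr_left
  intro x hx
  by_cases hxi : x = i
  · subst hxi
    simp only [if_pos]
    apply List.map_congr_left
    intro c hc
    by_cases hcj : c = j <;> simp [hcj]
  · simp only [if_neg hxi]
    apply List.map_congr_left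
    intro c hc
    have : ¬ (x = i ∧ c = j) := fun h => hxi h.1
    simp [this]

def eidx (C_E : List String) (s : String) : Nat := (PySem.List.index? C_E s).getD 0
def edgeP (C_E : List String) (preds : List (String × String)) (x c : Nat) : Bool :=
  preds.any (fun p => eidx C_E p.1 == x && eidx C_E p.2 == c)

theorem build_eq (C_E : List String) (H W : Nat) (preds : List (String × String))
    (hb : ∀ p ∈ preds, eidx C_E p.1 < H ∧ eidx C_E p.2 < W ∧ p.1 ∈ C_E ∧ p.2 ∈ C_E)
    (f : Nat → Nat → Bool) :
    preds.foldl (fun m pred =>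
      match PySem.List.index? C_E pred.1, PySem.List.index? C_E pred.2 with
      | some src_idx, some snk_idx =>
          PySem.List.pySetD m (src_idx : Int)
            (PySem.List.pySetD (PySem.List.pyGetD m (src_idx : Int) []) (snk_idx : Int) (1 : Int))
      | _, _ => m) (mat H W f) =
    mat H W (fun x c => f x c || edgeP C_E preds x c) := by
  induction preds generalizing f with
  | nil =>
    simp only [List.foldl_nil]
    apply mat_congr; intro x _ c _; simp [edgeP]
  | cons p t ih =>
    obtain ⟨h1, h2, h3, h4⟩ := hb p (List.mem_cons_self ..)
    obtain ⟨i, hi⟩ := Option.isSome_iff_exists.mp ((PySem.List.index?_isSome_iff C_E p.1).mpr h3)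
    obtain ⟨j, hj⟩ := Option.isSome_iff_exists.mp ((PySem.List.index?_isSome_iff C_E p.2).mpr h4)
    have hei : eidx C_E p.1 = i := by simp only [eidx, hi, Option.getD_some]
    have hej : eidx C_E p.2 = j := by simp only [eidx, hj, Option.getD_some]
    rw [hei] at h1; rw [hej] at h2
    simp only [List.foldl_cons, hi, hj]
    have hset := setcell H W i j h1 h2 f true
    simp only [if_pos] at hset
    rw [hset]
    rw [ih (fun q hq => hb q (List.mem_cons_of_mem _ hq)) _]
    apply mat_congr; intro x _ c _
    refine Bool.eq_iff_iff.mpr ?_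
    simp only [Bool.or_eq_true, edgeP, List.any_cons, Bool.and_eq_true, beq_iff_eq, hei, hej]
    by_cases hxi : x = i ∧ c = j
    · obtain ⟨rfl, rfl⟩ := hxi
      simp
    · simp only [if_neg hxi]
      constructor
      · rintro (h | h)
        · exact Or.inl h
        · exact Or.inr (Or.inr h)
      · rintro (h | ⟨ha, hb'⟩ | h)
        · exact Or.inl h
        · exact absurd ⟨ha.symm, hb'.symm⟩ hxi
        · exact Or.inr h

theorem clear_eq (H W : Nat) (L : List (Int × Int))
    (hL : ∀ r ∈ L, ∃ x, ∃ c, x < H ∧ c < W ∧ r = ((x : Int), (c : Int)))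
    (f : Nat → Nat → Bool) :
    L.foldl (fun m r =>
        PySem.List.pySetD m r.1 (PySem.List.pySetD (PySem.List.pyGetD m r.1 []) r.2 (0 : Int)))
      (mat H W f) =
    mat H W (fun x c => f x c && !decide (((x : Int), (c : Int)) ∈ L)) := by
  induction L generalizing f with
  | nil =>
    simp only [List.foldl_nil]
    apply mat_congr; intro x _ c _; simp
  | cons r t ih =>
    obtain ⟨a, b, ha, hb, rfl⟩ := hL r (List.mem_cons_self ..)
    simp only [List.foldl_cons]
    have hset := setcell H W a b ha hb f false
    simp only [Bool.false_eq_true, if_false] at hset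
    rw [hset]
    rw [ih (fun q hq => hL q (List.mem_cons_of_mem _ hq)) _]
    apply mat_congr; intro x _ c _
    refine Bool.eq_iff_iff.mpr ?_
    simp only [Bool.and_eq_true, Bool.not_eq_true', decide_eq_false_iff_not, List.mem_cons,
      Prod.mk.injEq, Nat.cast_inj, not_or]
    by_cases hxc : x = a ∧ c = b
    · obtain ⟨rfl, rfl⟩ := hxc
      simp
    · simp only [if_neg hxc]
      constructor
      · rintro ⟨hf, hnt⟩
        exact ⟨hf, fun h => hxc h, hnt⟩
      · rintro ⟨hf, _, hnt⟩
        exact ⟨hf, hnt⟩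

theorem rowval' (H W : Nat) (f : Nat → Nat → Bool) (a b : Nat) :
    (PySem.List.pyGetD (PySem.List.pyGetD (mat H W f) (a : Int) []) (b : Int) 0 ≠ 0) ↔
      (a < H ∧ b < W ∧ f a b = true) := by
  by_cases ha : a < H
  · rw [rowval H W f a b ha]
    split_ifs with h <;> simp_all
  · have hrow : PySem.List.pyGetD (mat H W f) (a : Int) [] = [] := by
      rw [PySem.List.pyGetD_natCast]
      unfold mat
      rw [List.getD_eq_getElem?_getD, List.getElem?_eq_none (by simpa using ha)]
      rfl
    rw [hrow, PySem.List.pyGetD_natCast]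
    simp [ha]

-- ===== B-side lemmas =====

theorem get?_foldl_insert_const (l : List Int) (d : PySem.Dict Int (PySem.Set Int)) (k : Int) :
    (l.foldl (fun d x => d.insert x PySem.Set.empty) d).get? k
      = if k ∈ l then some PySem.Set.empty else d.get? k := by
  induction l generalizing d with
  | nil => simp
  | cons a t ih =>
    simp only [List.foldl_cons, ih, List.mem_cons]
    by_cases hk : k ∈ t
    · simp [hk]
    · rw [if_neg hk, PySem.Dict.get?_insert]
      by_cases hka : k = a <;> simp [hka, hk]

def SuccInv (H : Nat) (d : PySem.Dict Int (PySem.Set Int)) (g : Int → Int → Bool) : Prop :=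
  (∀ k : Int, (d.get? k ≠ none) ↔ ∃ n : Nat, n < H ∧ k = (n : Int)) ∧
  (∀ k S, d.get? k = some S → ∀ c, c ∈ S ↔ g k c = true)

theorem succInv_congr (H : Nat) (d : PySem.Dict Int (PySem.Set Int)) (g g' : Int → Int → Bool)
    (hgg : ∀ a b, g a b = g' a b) (h : SuccInv H d g) : SuccInv H d g' := by
  exact ⟨h.1, fun k S hk c => by rw [← hgg k c]; exact h.2 k S hk c⟩

def edgeI (C_E : List String) (preds : List (String × String)) (a b : Int) : Bool :=
  preds.any (fun p => ((eidx C_E p.1 : Int) == a) && ((eidx C_E p.2 : Int) == b))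

theorem edgeI_cast (C_E : List String) (preds : List (String × String)) (x c : Nat) :
    edgeI C_E preds (x : Int) (c : Int) = edgeP C_E preds x c := by
  unfold edgeI edgeP
  congr 1
  funext p
  refine Bool.eq_iff_iff.mpr ?_
  simp [Nat.cast_inj]

theorem succ_build (C_E : List String) (H : Nat) (preds : List (String × String))
    (hb : ∀ p ∈ preds, eidx C_E p.1 < H ∧ p.1 ∈ C_E ∧ p.2 ∈ C_E)
    (d : PySem.Dict Int (PySem.Set Int)) (g : Int → Int → Bool) (hd : SuccInv H d g) :
    SuccInv H (preds.foldl (fun d p =>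
      match PySem.List.index? C_E p.1 with
      | none => d
      | some s =>
        match PySem.List.index? C_E p.2 with
        | none => d
        | some t =>
          match d.get? (s : Int) with
          | none => d
          | some S => d.insert (s : Int) (PySem.Set.add S (t : Int))) d)
      (fun a b => g a b || edgeI C_E preds a b) := by
  induction preds generalizing d g with
  | nil =>
    simp only [List.foldl_nil]
    exact succInv_congr H d g _ (by intro a b; simp [edgeI]) hd
  | cons p t ih =>
    obtain ⟨h1, h3, h4⟩ := hb p (List.mem_cons_self ..)
    obtain ⟨i, hi⟩ := Option.isSome_iff_exists.mp ((PySem.List.index?_isSome_iff C_E p.1).mpr h3)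
    obtain ⟨j, hj⟩ := Option.isSome_iff_exists.mp ((PySem.List.index?_isSome_iff C_E p.2).mpr h4)
    have hei : eidx C_E p.1 = i := by simp only [eidx, hi, Option.getD_some]
    have hej : eidx C_E p.2 = j := by simp only [eidx, hj, Option.getD_some]
    rw [hei] at h1
    simp only [List.foldl_cons, hi, hj]
    have hksome : d.get? (i : Int) ≠ none := (hd.1 (i : Int)).mpr ⟨i, h1, rfl⟩
    obtain ⟨S, hS⟩ := Option.ne_none_iff_exists'.mp hksome
    rw [hS]
    have hd' : SuccInv H (d.insert (i : Int) (PySem.Set.add S (j : Int)))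
        (fun a b => g a b || (((i : Nat) : Int) == a && ((j : Nat) : Int) == b)) := by
      constructor
      · intro k
        rw [PySem.Dict.get?_insert]
        by_cases hk : k = (i : Int)
        · simp only [hk]
          constructor
          · intro _; exact ⟨i, h1, rfl⟩
          · intro _; simp
        · rw [if_neg hk]; exact hd.1 k
      · intro k S' hk c
        rw [PySem.Dict.get?_insert] at hk
        by_cases hki : k = (i : Int)
        · rw [if_pos hki] at hk
          cases hk
          subst hki
          rw [PySem.Set.mem_add]
          constructor
          · rintro (h | rfl)
            · simp [(hd.2 _ S hS c).mp h]
            · simp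
          · intro h
            simp only [Bool.or_eq_true, Bool.and_eq_true, beq_iff_eq] at h
            rcases h with h | ⟨-, rfl⟩
            · exact Or.inl ((hd.2 _ S hS c).mpr h)
            · exact Or.inr rfl
        · rw [if_neg hki] at hk
          have := hd.2 k S' hk c
          simp only [this]
          have : (((i : Nat) : Int) == k) = false := by
            simp only [beq_eq_false_iff_ne, ne_eq]
            exact fun h => hki h.symm
          simp [this]
    have := ih (fun q hq => hb q (List.mem_cons_of_mem _ hq)) _ _ hd'
    refine succInv_congr H _ _ _ ?_ this
    intro a b
    simp only [edgeI, List.any_cons, hei, hej]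
    cases hgab : g a b <;> cases hone : (((i : Nat) : Int) == a && ((j : Nat) : Int) == b) <;> simp_all

theorem mem_cond_union (l : List Int) (P : Int → Prop) [DecidablePred P]
    (g : Int → List Int) (acc : PySem.Set Int) (z : Int) :
    z ∈ l.foldl (fun acc y => if P y then (g y).foldl (fun a c => PySem.Set.add a c) acc else acc) acc
      ↔ z ∈ acc ∨ ∃ y ∈ l, P y ∧ z ∈ g y := by
  induction l generalizing acc with
  | nil => simp
  | cons a t ih =>
    simp only [List.foldl_cons]
    by_cases hP : P a
    · rw [if_pos hP, ih]
      have hmem : z ∈ (g a).foldl (fun a c => PySem.Set.add a c) acc ↔ z ∈ acc ∨ z ∈ g a := by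
        have := PySem.Set.mem_foldl_add (l := g a) (f := fun c => c) (s := acc) (y := z)
        simpa using this
      rw [hmem]
      constructor
      · rintro ((h | h) | ⟨y, hy, hPy, hz⟩)
        · exact Or.inl h
        · exact Or.inr ⟨a, List.mem_cons_self .., hP, h⟩
        · exact Or.inr ⟨y, List.mem_cons_of_mem _ hy, hPy, hz⟩
      · rintro (h | ⟨y, hy, hPy, hz⟩)
        · exact Or.inl (Or.inl h)
        · rcases List.mem_cons.mp hy with rfl | hy
          · exact Or.inl (Or.inr hz)
          · exact Or.inr ⟨y, hy, hPy, hz⟩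
    · rw [if_neg hP, ih]
      constructor
      · rintro (h | ⟨y, hy, hPy, hz⟩)
        · exact Or.inl h
        · exact Or.inr ⟨y, List.mem_cons_of_mem _ hy, hPy, hz⟩
      · rintro (h | ⟨y, hy, hPy, hz⟩)
        · exact Or.inl h
        · rcases List.mem_cons.mp hy with rfl | hy
          · exact absurd hPy hP
          · exact Or.inr ⟨y, hy, hPy, hz⟩

theorem alt_eq_mat (C_E : List String) (preds : List (String × String)) (h_ : Int) (w : Int)
    (hb : ∀ p ∈ preds, eidx C_E p.1 < h_.toNat ∧ p.1 ∈ C_E ∧ p.2 ∈ C_E) :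
    optimize_by_matrix_alt C_E preds h_ w =
      mat h_.toNat w.toNat (fun x c =>
        edgeP C_E preds x c &&
          !decide (∃ n : Nat, n < h_.toNat ∧ n ≠ x ∧ edgeP C_E preds x n = true ∧ edgeP C_E preds n c = true)) := by
  simp only [optimize_by_matrix_alt]
  set H := h_.toNat with hH
  set W := w.toNat with hW
  have hrange : ∀ k : Int, k ∈ PySem.List.pyRange 0 h_ 1 ↔ ∃ n : Nat, n < H ∧ k = (n : Int) := by
    intro k
    rw [range_cast h_]
    simp only [List.mem_map, List.mem_range]
    constructor
    · rintro ⟨n, hn, rfl⟩; exact ⟨n, hn, rfl⟩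
    · rintro ⟨n, hn, rfl⟩; exact ⟨n, hn, rfl⟩
  have hsucc0 : SuccInv H ((PySem.List.pyRange 0 h_ 1).foldl
      (fun d x => d.insert x PySem.Set.empty) PySem.Dict.empty) (fun _ _ => false) := by
    constructor
    · intro k
      rw [get?_foldl_insert_const]
      by_cases hk : k ∈ PySem.List.pyRange 0 h_ 1
      · rw [if_pos hk]
        exact iff_of_true (by simp) ((hrange k).mp hk)
      · rw [if_neg hk, PySem.Dict.get?_empty]
        exact iff_of_false (by simp) (fun h => hk ((hrange k).mpr h))
    · intro k S hk c
      rw [get?_foldl_insert_const] at hk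
      by_cases hkm : k ∈ PySem.List.pyRange 0 h_ 1
      · rw [if_pos hkm] at hk
        cases hk
        simp [PySem.Set.empty]
      · rw [if_neg hkm] at hk
        simp [PySem.Dict.get?_empty] at hk
  have hinv := succ_build C_E H preds hb _ _ hsucc0
  set succ := preds.foldl (fun d p =>
    match PySem.List.index? C_E p.1 with
    | none => d
    | some s =>
      match PySem.List.index? C_E p.2 with
      | none => d
      | some t =>
        match d.get? (s : Int) with
        | none => d
        | some S => d.insert (s : Int) (PySem.Set.add S (t : Int))) ((PySem.List.pyRange 0 h_ 1).foldl
      (fun d x => d.insert x PySem.Set.empty) PySem.Dict.empty) with hsuccdef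
  have hinv' : SuccInv H succ (edgeI C_E preds) :=
    succInv_congr H _ _ _ (by intro a b; simp) hinv
  -- membership of a successor set
  have hget : ∀ a : Int, (∃ n : Nat, n < H ∧ a = (n : Int)) →
      ∀ c : Int, (c ∈ (succ.get? a).getD PySem.Set.empty ↔ edgeI C_E preds a c = true) := by
    intro a ha c
    obtain ⟨S, hS⟩ := Option.ne_none_iff_exists'.mp ((hinv'.1 a).mpr ha)
    rw [hS, Option.getD_some]
    exact hinv'.2 a S hS c
  rw [range_cast h_, range_cast w, List.map_map]
  unfold mat
  apply List.map_congr_left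
  intro x hx
  rw [List.mem_range] at hx
  simp only [Function.comp_apply, List.map_map]
  apply List.map_congr_left
  intro c hc
  rw [List.mem_range] at hc
  simp only [Function.comp_apply]
  -- characterize the cell
  have hsx := hget (x : Int) ⟨x, hx, rfl⟩
  have himpl : ∀ z : Int,
      z ∈ ((succ.get? (x : Int)).getD PySem.Set.empty).foldl (fun acc y =>
        if y ≠ (x : Int) ∧ y < h_ then
          ((succ.get? y).getD PySem.Set.empty).foldl (fun a c => PySem.Set.add a c) acc
        else acc) PySem.Set.empty
      ↔ ∃ y, edgeI C_E preds (x : Int) y = true ∧ (y ≠ (x : Int) ∧ y < h_) ∧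
          z ∈ (succ.get? y).getD PySem.Set.empty := by
    intro z
    rw [mem_cond_union]
    simp only [PySem.Set.empty, List.not_mem_nil, false_or]
    constructor
    · rintro ⟨y, hy, hPy, hz⟩
      exact ⟨y, (hsx y).mp hy, hPy, hz⟩
    · rintro ⟨y, hy, hPy, hz⟩
      exact ⟨y, (hsx y).mpr hy, hPy, hz⟩
  refine if_congr ?_ rfl rfl
  rw [hsx (c : Int), himpl (c : Int)]
  rw [edgeI_cast]
  simp only [Bool.and_eq_true, Bool.not_eq_true', decide_eq_false_iff_not]
  constructor
  · rintro ⟨he, hni⟩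
    refine ⟨he, ?_⟩
    rintro ⟨n, hnH, hnx, hxn, hnc⟩
    apply hni
    refine ⟨(n : Int), ?_, ⟨?_, ?_⟩, ?_⟩
    · rw [edgeI_cast]; exact hxn
    · simpa [Nat.cast_inj] using hnx
    · omega
    · rw [hget (n : Int) ⟨n, hnH, rfl⟩ (c : Int), edgeI_cast]; exact hnc
  · rintro ⟨he, hnE⟩
    refine ⟨he, ?_⟩
    rintro ⟨y, hxy, ⟨hyx, hyh⟩, hz⟩
    -- y is a Nat cast: it is the target index of some predicate
    obtain ⟨p, hp, hpe⟩ := List.any_eq_true.mp hxy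
    simp only [Bool.and_eq_true, beq_iff_eq] at hpe
    have hy : y = ((eidx C_E p.2 : Nat) : Int) := hpe.2.symm
    have hyH : (eidx C_E p.2 : Nat) < H := by omega
    apply hnE
    refine ⟨eidx C_E p.2, hyH, ?_, ?_, ?_⟩
    · intro hcontr; apply hyx; rw [hy, hcontr]
    · rw [← edgeI_cast, ← hy]; exact hxy
    · have := (hget y (⟨eidx C_E p.2, hyH, hy⟩) (c : Int)).mp hz
      rw [hy, edgeI_cast] at this
      exact this

theorem main (C_E : List String) (preds : List (String × String)) (h_ : Int) (w : Int)
    (pre1 : ∀ p ∈ preds, p.1 ∈ C_E ∧ p.2 ∈ C_E ∧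
      (((PySem.List.index? C_E p.1).getD 0 : Int) < h_) ∧
      (((PySem.List.index? C_E p.2).getD 0 : Int) < w)) :
    optimize_by_matrix C_E preds h_ w = optimize_by_matrix_alt C_E preds h_ w := by
  simp only [optimize_by_matrix]
  set H := h_.toNat with hH
  set W := w.toNat with hW
  have hb : ∀ p ∈ preds, eidx C_E p.1 < H ∧ eidx C_E p.2 < W ∧ p.1 ∈ C_E ∧ p.2 ∈ C_E := by
    intro p hp
    obtain ⟨h1, h2, h3, h4⟩ := pre1 p hp
    exact ⟨by unfold eidx; omega, by unfold eidx; omega, h1, h2⟩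
  have hPW : ∀ a b : Nat, edgeP C_E preds a b = true → b < W := by
    intro a b he
    obtain ⟨p, hp, hpe⟩ := List.any_eq_true.mp he
    simp only [Bool.and_eq_true, beq_iff_eq] at hpe
    exact hpe.2 ▸ (hb p hp).2.1
  have hm0 : ((PySem.List.pyRange 0 h_ 1).map
      (fun _ => (PySem.List.pyRange 0 w 1).map (fun _ => (0 : Int)))) = mat H W (fun _ _ => false) := by
    unfold mat
    rw [range_cast h_, range_cast w]
    simp only [List.map_map]
    rfl
  rw [hm0, build_eq C_E H W preds hb]
  rw [mat_congr H W (fun x c => false || edgeP C_E preds x c) (edgeP C_E preds)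
    (by intro x _ c _; simp)]
  rw [range_cast h_, range_cast w]
  simp only [List.foldl_map]
  simp only [foldl_ite_append, foldl_ite_flat, PySem.List.foldl_append_eq_flatMap]
  rw [List.nil_append]
  rw [alt_eq_mat C_E preds h_ w (fun p hp => ⟨(hb p hp).1, (hb p hp).2.2.1, (hb p hp).2.2.2⟩)]
  refine Eq.trans (clear_eq H W _ ?_ _) ?_
  · intro r hr
    simp only [List.mem_flatMap, List.mem_map, List.mem_filter, List.mem_range,
      List.mem_ite_nil_right] at hr
    obtain ⟨x, hx, y, hy, -, c, ⟨hc, -⟩, rfl⟩ := hr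
    exact ⟨x, c, hx, hc, rfl⟩
  · apply mat_congr
    intro x hx c hc
    refine Bool.eq_iff_iff.mpr ?_
    simp only [Bool.and_eq_true, Bool.not_eq_true', decide_eq_false_iff_not]
    constructor
    · rintro ⟨he, hnm⟩
      refine ⟨he, ?_⟩
      rintro ⟨n, hnH, hnx, hxn, hnc⟩
      apply hnm
      simp only [List.mem_flatMap, List.mem_ite_nil_right, List.mem_map, List.mem_filter,
        List.mem_range, decide_eq_true_eq, Prod.mk.injEq, Nat.cast_inj]
      refine ⟨x, hx, ⟨n, hnH, ?_, c, ⟨hc, ?_, ?_, ?_⟩, rfl, rfl⟩⟩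
      · simpa [Nat.cast_inj] using (fun h => hnx h.symm : ¬ x = n)
      · rw [rowval']; exact ⟨hx, hc, he⟩
      · rw [rowval']; exact ⟨hnH, hc, hnc⟩
      · rw [rowval']; exact ⟨hx, hPW x n hxn, hxn⟩
    · rintro ⟨he, hnE⟩
      refine ⟨he, ?_⟩
      intro hmem
      simp only [List.mem_flatMap, List.mem_ite_nil_right, List.mem_map, List.mem_filter,
        List.mem_range, decide_eq_true_eq, Prod.mk.injEq, Nat.cast_inj] at hmem
      obtain ⟨x', hx', hne, y, hy, hxy, c', ⟨hc', hcond1, hcond2, hcond3⟩, hxx, hcc⟩ := hmem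
      obtain ⟨hc2, hm1, hm2, hm3⟩ := c'
      rw [rowval'] at hm2 hm3
      exact hnE ⟨hne, y, fun h => hy (by rw [h]), hm3.2.2, hm2.2.2⟩

-- ===== VERDICT (by name: the statement is the Claim_ definition above) =====
theorem optimize_by_matrix_spec : Claim_equal_optimize_by_matrix := by
  intro C_E preds h_ w _ pre
  unfold Pre_optimize_by_matrix at pre
  show optimize_by_matrix C_E preds h_ w = optimize_by_matrix_alt C_E preds h_ w
  exact main C_E preds h_ w pre.1
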